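-- pv_equiv track=rewrite | github.com/bwdpaepe/dodona | oefening5.py | zien
-- ===== SOURCE A (Python) =====
-- def zien(lijstHoedOpHoofd):
--     aantalRode = 0
--     lijstHoedInGeheugen=[]
--     for i in range(len(lijstHoedOpHoofd)):
--         if aantalRode % 2 != 0:
--             lijstHoedInGeheugen.append('R')
--         else:
--             lijstHoedInGeheugen.append('B')
--         if lijstHoedOpHoofd[i] == 'R':
--             aantalRode += 1
--     return tuple(lijstHoedInGeheugen)
-- ===== SOURCE B (Python) =====
-- def zien(lijstHoedOpHoofd):
--     # phase 1: prefix table of red counts (prefixes[i] = reds among first i hats)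
--     prefixes = [0]
--     for h in lijstHoedOpHoofd:
--         prefixes.append(prefixes[-1] + (h == 'R'))
--     # phase 2: map each prefix parity to a hat colour
--     return tuple('R' if p % 2 else 'B' for p in prefixes[:-1])
-- ===== Notes on version B (the rewrite author's own statement) =====
-- stated objective: alternative
-- what changed: Replaces the single interleaved count-and-append loop by two separate phases: first a materialized prefix table of cumulative red counts, then a map from each prefix's parity to 'R'/'B'.
import Mathlib
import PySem

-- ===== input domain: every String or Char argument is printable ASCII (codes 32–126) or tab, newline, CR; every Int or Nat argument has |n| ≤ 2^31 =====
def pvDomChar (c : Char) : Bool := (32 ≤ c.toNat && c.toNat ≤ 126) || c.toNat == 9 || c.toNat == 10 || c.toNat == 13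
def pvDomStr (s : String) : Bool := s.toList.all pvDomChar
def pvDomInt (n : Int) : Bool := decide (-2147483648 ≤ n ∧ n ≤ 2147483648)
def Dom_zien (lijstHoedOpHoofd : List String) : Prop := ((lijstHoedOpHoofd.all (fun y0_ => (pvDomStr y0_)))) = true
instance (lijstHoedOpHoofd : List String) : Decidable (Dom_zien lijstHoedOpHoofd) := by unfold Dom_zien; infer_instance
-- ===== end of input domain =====

-- B replaces A's single interleaved count-and-emit loop by two phases: a materialized prefix table of red counts, then a parity-to-colour map (alternative decomposition, same cost).


-- ===== PORT A =====
-- A: one loop, interleaving "emit hat from current parity" and "count reds".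
def zien (lijstHoedOpHoofd : List String) : List String :=
  (lijstHoedOpHoofd.foldl
    (fun (s : Int × List String) h =>
      (if h == "R" then s.1 + 1 else s.1,
       s.2 ++ [if s.1 % 2 ≠ 0 then "R" else "B"]))
    (0, [])).2

-- ===== PORT B =====
-- B: phase 1 builds the prefix table of red counts; phase 2 maps parities to colours.
def zien_alt (lijstHoedOpHoofd : List String) : List String :=
  let prefixes : List Int :=
    (lijstHoedOpHoofd.map (fun h => if h == "R" then (1 : Int) else 0)).scanl (· + ·) 0
  prefixes.dropLast.map (fun p => if p % 2 ≠ 0 then "R" else "B")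

-- ===== PRECONDITION & SPEC =====
def Spec_zien (lijstHoedOpHoofd : List String) (out : List String) : Prop := out = zien_alt lijstHoedOpHoofd
instance (lijstHoedOpHoofd : List String) (out : List String) : Decidable (Spec_zien lijstHoedOpHoofd out) := by unfold Spec_zien; infer_instance

-- ===== CLAIM (what is proved, stated in full; the proofs are below) =====
def Claim_equal_zien : Prop := ∀ (lijstHoedOpHoofd : List String), Dom_zien lijstHoedOpHoofd → Spec_zien lijstHoedOpHoofd (zien lijstHoedOpHoofd)

-- ===== LEMMAS AND PROOFS =====

lemma scanl_add_ne_nil (c : Int) (l : List Int) : l.scanl (· + ·) c ≠ [] := by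
  cases l <;> simp [List.scanl_cons]

lemma zien_loop_eq (l : List String) : ∀ (c : Int) (acc : List String),
    (l.foldl
      (fun (s : Int × List String) h =>
        (if h == "R" then s.1 + 1 else s.1,
         s.2 ++ [if s.1 % 2 ≠ 0 then "R" else "B"]))
      (c, acc)).2
    = acc ++ ((l.map (fun h => if h == "R" then (1 : Int) else 0)).scanl (· + ·) c).dropLast.map
        (fun p => if p % 2 ≠ 0 then "R" else "B") := by
  induction l with
  | nil => intro c acc; simp
  | cons h t ih =>
      intro c acc
      rw [List.foldl_cons, List.map_cons, List.scanl_cons,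
          List.dropLast_cons_of_ne_nil (scanl_add_ne_nil _ _), List.map_cons]
      by_cases hR : h == "R"
      · rw [if_pos hR, if_pos hR, ih]
        simp
      · rw [if_neg hR, if_neg hR, ih]
        simp

-- ===== VERDICT (by name: the statement is the Claim_ definition above) =====
theorem zien_spec : Claim_equal_zien := by
  intro l _
  unfold Spec_zien zien zien_alt
  exact zien_loop_eq l 0 []
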